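-- pv_equiv track=rewrite | github.com/ReinderN/School | Reinder/Jaar 1/Programeren/Week 9/wk9ex1/wk9ex1.py | diagonalize
-- ===== SOURCE A (Python) =====
-- def create_one_row(width):
--     """ returns one row of zeros of width "width"...
--         You might use this in your create_board(width, height) function """
--     row = []
--     for col in range(width):
--         row += [0]
--     return row
--
-- def create_board(width, height):
--     """Returns a 2D array with "height" rows and "width" columns."""
--     a = []
--     for row in range(height):
--         # gebruik de bovenstaande functie zodat ... één rij is!!
--         a += [create_one_row(width)]
--     return a
--
-- def diagonalize(width, height):
--     """Creates an empty board and then modifies it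
--        so that it has a diagonal strip of "on" cells.
--        But do that only in the *interior* of the 2D array.
--     """
--     a = create_board(width, height)
--
--     for row in range(1, height - 1):
--         for col in range(1, width - 1):
--             if row == col:
--                 a[row][col] = 1
--             else:
--                 a[row][col] = 0
--
--     return a
-- ===== SOURCE B (Python) =====
-- def diagonalize(width, height):
--     """Row-block construction: each row is assembled from whole zero blocks
--     ([0]*r + [1] + [0]*(width-r-1) for interior diagonal rows, [0]*width
--     otherwise) instead of deciding cell by cell."""
--     board = []
--     for r in range(height):
--         if 0 < r < height - 1 and r < width - 1:
--             board.append([0] * r + [1] + [0] * (width - r - 1))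
--         else:
--             board.append([0] * width)
--     return board
-- ===== Notes on version B (the rewrite author's own statement) =====
-- stated objective: alternative
-- what changed: Replaced the create-zero-board-then-overwrite-interior double pass (per-cell inner loop) by row-block assembly: each row is built directly from whole zero blocks with a single 1 spliced in for interior diagonal rows, so there is no per-cell inner loop at all.
import Mathlib
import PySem

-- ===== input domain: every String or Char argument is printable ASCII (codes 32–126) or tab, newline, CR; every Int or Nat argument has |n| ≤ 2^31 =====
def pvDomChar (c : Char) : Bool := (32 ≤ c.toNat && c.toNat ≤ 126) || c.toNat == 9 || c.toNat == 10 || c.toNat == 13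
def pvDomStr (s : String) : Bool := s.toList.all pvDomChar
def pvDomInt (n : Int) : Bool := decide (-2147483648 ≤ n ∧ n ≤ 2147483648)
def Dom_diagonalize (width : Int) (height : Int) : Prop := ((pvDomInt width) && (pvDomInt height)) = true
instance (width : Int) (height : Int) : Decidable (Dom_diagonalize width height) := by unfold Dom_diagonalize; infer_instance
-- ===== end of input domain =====

-- B assembles each row from whole zero blocks (with one 1 spliced in on interior
-- diagonal rows) instead of A's create-zero-board-then-overwrite-interior passes.


-- ===== PORT A =====
def create_one_row (width : Int) : List Int :=
  (PySem.List.pyRange 0 width 1).foldl (fun row _col => row ++ [(0 : Int)]) []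

def create_board (width : Int) (height : Int) : List (List Int) :=
  (PySem.List.pyRange 0 height 1).foldl (fun a _row => a ++ [create_one_row width]) []

def diagonalize (width : Int) (height : Int) : List (List Int) :=
  (PySem.List.pyRange 1 (height - 1) 1).foldl
    (fun a row =>
      (PySem.List.pyRange 1 (width - 1) 1).foldl
        (fun a col =>
          -- a[row][col] = …  (row and col are nonnegative, in-range indices here)
          a.modify row.toNat (fun rw => rw.set col.toNat (if row = col then (1 : Int) else 0)))
        a)
    (create_board width height)

-- ===== PORT B =====
def diagonalize_alt (width : Int) (height : Int) : List (List Int) :=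
  (PySem.List.pyRange 0 height 1).foldl
    (fun board r =>
      board ++
        [if 0 < r ∧ r < height - 1 ∧ r < width - 1 then
            List.replicate r.toNat (0 : Int) ++ [(1 : Int)] ++
              List.replicate (width - r - 1).toNat (0 : Int)
          else List.replicate width.toNat (0 : Int)])
    []

-- ===== PRECONDITION & SPEC =====
def Spec_diagonalize (width : Int) (height : Int) (out : List (List Int)) : Prop := out = diagonalize_alt width height
instance (width : Int) (height : Int) (out : List (List Int)) : Decidable (Spec_diagonalize width height out) := by unfold Spec_diagonalize; infer_instance

-- ===== CLAIM (what is proved, stated in full; the proofs are below) =====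
def Claim_equal_diagonalize : Prop := ∀ (width : Int) (height : Int), Dom_diagonalize width height → Spec_diagonalize width height (diagonalize width height)

-- ===== LEMMAS AND PROOFS =====

/-- The Nat-indexed form of A's interior row update: set the cells `1..nC` of one row. -/
def pvRow (nC : Nat) (r : Nat) (rw : List Int) : List Int :=
  ((List.range nC).map (· + 1)).foldl
    (fun rw c => rw.modify c (fun _ => if r = c then (1 : Int) else 0)) rw

/-- Repeatedly appending a constant yields `init ++ replicate`. -/
theorem pv_foldl_snoc {α β : Type} (v : α) :
    ∀ (l : List β) (init : List α),
      l.foldl (fun r _ => r ++ [v]) init = init ++ List.replicate l.length v := by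
  intro l
  induction l with
  | nil => simp
  | cons x xs ih =>
      intro init
      simp [List.foldl_cons, ih, List.replicate_succ]

/-- Appending one mapped element per step yields `init ++ map`. -/
theorem pv_foldl_snoc_map {α β : Type} (f : β → α) :
    ∀ (l : List β) (init : List α),
      l.foldl (fun r x => r ++ [f x]) init = init ++ l.map f := by
  intro l
  induction l with
  | nil => simp
  | cons x xs ih =>
      intro init
      simp [List.foldl_cons, ih]

theorem pv_create_one_row (width : Int) :
    create_one_row width = List.replicate width.toNat 0 := by
  rw [create_one_row, pv_foldl_snoc, PySem.List.length_pyRange_one]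
  simp

theorem pv_create_board (width height : Int) :
    create_board width height = List.replicate height.toNat (List.replicate width.toNat 0) := by
  rw [create_board, pv_foldl_snoc, PySem.List.length_pyRange_one]
  simp [pv_create_one_row]

/-- Folding modifies of a single fixed row index collapses into one `modify`. -/
theorem pv_foldl_modify_same {α β : Type} (r : Nat) (f : β → α → α) :
    ∀ (cs : List β) (a : List α),
      cs.foldl (fun a c => a.modify r (f c)) a =
        a.modify r (fun x => cs.foldl (fun x c => f c x) x) := by
  intro cs
  induction cs with
  | nil => intro a; exact (List.modify_id r a).symm
  | cons c cs ih =>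
      intro a
      rw [List.foldl_cons, ih, List.modify_modify_eq]
      rfl

/-- Folding `modify` over distinct indices: pointwise characterisation. -/
theorem pv_foldl_modify {α : Type} (g : Nat → α → α) :
    ∀ (R : List Nat), R.Nodup → ∀ (a : List α) (j : Nat),
      (R.foldl (fun a r => a.modify r (g r)) a)[j]? =
        Option.map (fun x => if j ∈ R then g j x else x) a[j]? := by
  intro R
  induction R with
  | nil => intro _ a j; cases h : a[j]? <;> simp [h]
  | cons r R ih =>
      intro hnd a j
      have hr : r ∉ R := (List.nodup_cons.mp hnd).1
      rw [List.foldl_cons, ih (List.nodup_cons.mp hnd).2, List.getElem?_modify]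
      cases a[j]? with
      | none => simp
      | some x =>
          simp only [Option.map_eq_map, Option.map_some]
          by_cases hjR : j ∈ R
          · have hne : r ≠ j := fun h => hr (h ▸ hjR)
            simp [hjR, hne, List.mem_cons]
          · by_cases hrj : r = j
            · subst hrj; simp [hjR]
            · have h1 : j ∉ r :: R := by
                intro h
                rcases List.mem_cons.mp h with h | h
                exacts [hrj h.symm, hjR h]
              rw [if_neg hjR, if_neg hrj, if_neg h1]

theorem pv_mem_shift_range (n i : Nat) :
    i ∈ (List.range n).map (· + 1) ↔ 1 ≤ i ∧ i < n + 1 := by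
  simp only [List.mem_map, List.mem_range]
  constructor
  · rintro ⟨k, hk, rfl⟩; omega
  · rintro ⟨h1, h2⟩; exact ⟨i - 1, by omega, by omega⟩

theorem pv_nodup_shift_range (n : Nat) : ((List.range n).map (· + 1)).Nodup :=
  (List.nodup_range).map (fun a b h => by omega)

/-- A's inner column loop, for a row value `1 + k`, is `pvRow` at row index `k + 1`. -/
theorem pv_inner_eq (width : Int) (k : Nat) (rw : List Int) :
    (PySem.List.pyRange 1 (width - 1) 1).foldl
      (fun rw col => rw.set col.toNat (if (1 : Int) + (k : Nat) = col then (1 : Int) else 0)) rw =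
      pvRow (width - 1 - 1).toNat (k + 1) rw := by
  rw [PySem.List.pyRange_one, List.foldl_map, pvRow, List.foldl_map]
  have hstep : (fun (rw : List Int) (c : Nat) =>
        rw.set ((1 : Int) + (c : Nat)).toNat (if (1 : Int) + (k : Nat) = 1 + (c : Nat) then (1 : Int) else 0)) =
      (fun (rw : List Int) (c : Nat) =>
        rw.modify (c + 1) (fun _ => if k + 1 = c + 1 then (1 : Int) else 0)) := by
    funext rw c
    have h1 : ((1 : Int) + (c : Nat)).toNat = c + 1 := by omega
    have h2 : (if (1 : Int) + (k : Nat) = 1 + (c : Nat) then (1 : Int) else 0) =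
        (if k + 1 = c + 1 then (1 : Int) else 0) := by
      by_cases h : k = c
      · subst h; simp
      · rw [if_neg (by omega), if_neg (by omega)]
    rw [h1, h2, List.set_eq_modify]
  rw [hstep]

/-- Shift a fold over `range n` with index `k + 1` into a fold over the shifted list. -/
theorem pv_shift_fold (g : Nat → List Int → List Int) (n : Nat) (a : List (List Int)) :
    (List.range n).foldl (fun a k => a.modify (k + 1) (g (k + 1))) a =
      ((List.range n).map (· + 1)).foldl (fun a r => a.modify r (g r)) a := by
  rw [List.foldl_map]

/-- A's result, pointwise. -/
theorem pv_A_getElem? (width height : Int) (i : Nat) :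
    (diagonalize width height)[i]? =
      Option.map (fun rw =>
        if i ∈ (List.range (height - 1 - 1).toNat).map (· + 1) then
          pvRow (width - 1 - 1).toNat i rw
        else rw)
        (List.replicate height.toNat (List.replicate width.toNat (0 : Int)))[i]? := by
  rw [diagonalize, pv_create_board, PySem.List.pyRange_one 1 (height - 1), List.foldl_map]
  have hstep : (fun (a : List (List Int)) (k : Nat) =>
        (PySem.List.pyRange 1 (width - 1) 1).foldl
          (fun a col =>
            a.modify ((1 : Int) + (k : Nat)).toNat
              (fun rw => rw.set col.toNat (if (1 : Int) + (k : Nat) = col then (1 : Int) else 0)))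
          a) =
      (fun (a : List (List Int)) (k : Nat) =>
        a.modify (k + 1) (pvRow (width - 1 - 1).toNat (k + 1))) := by
    funext a k
    rw [pv_foldl_modify_same]
    have h1 : ((1 : Int) + (k : Nat)).toNat = k + 1 := by omega
    rw [h1]
    congr 1
    funext rw
    exact pv_inner_eq width k rw
  rw [hstep, pv_shift_fold (pvRow (width - 1 - 1).toNat)]
  exact pv_foldl_modify _ _ (pv_nodup_shift_range _) _ i

/-- An indicator list over `range w` is two zero blocks around a single 1. -/
theorem pv_indicator_blocks (w r : Nat) (hr : r < w) :
    (List.range w).map (fun c => if c = r then (1 : Int) else 0) =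
      List.replicate r 0 ++ [(1 : Int)] ++ List.replicate (w - r - 1) 0 := by
  have hw : w = (r + 1) + (w - r - 1) := by omega
  rw [hw, List.range_add, List.range_succ, List.map_append, List.map_append, List.map_map]
  congr 1
  · congr 1
    · rw [List.map_congr_left (g := fun _ => (0 : Int))
        (fun c hc => if_neg (by exact fun h => by simp at hc; omega))]
      simp [List.map_const']
    · simp
  · have hz : ∀ x ∈ List.range (w - r - 1),
        ((fun c => if c = r then (1 : Int) else 0) ∘ fun x => r + 1 + x) x = 0 := by
      intro x _
      show (if r + 1 + x = r then (1 : Int) else 0) = 0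
      rw [if_neg (by omega)]
    rw [List.map_congr_left hz, List.map_const', List.length_range]
    congr 1
    omega

/-- Each of B's rows equals the per-cell indicator row. -/
theorem pv_row_eq (width height : Int) (r : Nat) :
    (if 0 < ((r : Nat) : Int) ∧ ((r : Nat) : Int) < height - 1 ∧ ((r : Nat) : Int) < width - 1 then
        List.replicate ((r : Nat) : Int).toNat (0 : Int) ++ [(1 : Int)] ++
          List.replicate (width - (r : Nat) - 1).toNat (0 : Int)
      else List.replicate width.toNat (0 : Int)) =
    (List.range width.toNat).map (fun (c : Nat) =>
      if 0 < ((r : Nat) : Int) ∧ ((r : Nat) : Int) < height - 1 ∧ 0 < ((c : Nat) : Int) ∧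
          ((c : Nat) : Int) < width - 1 ∧ ((r : Nat) : Int) = ((c : Nat) : Int) then (1 : Int) else 0) := by
  by_cases h : 0 < ((r : Nat) : Int) ∧ ((r : Nat) : Int) < height - 1 ∧ ((r : Nat) : Int) < width - 1
  · rw [if_pos h]
    have hr : r < width.toNat := by omega
    have h1 : ((r : Nat) : Int).toNat = r := by omega
    have h2 : (width - (r : Nat) - 1).toNat = width.toNat - r - 1 := by omega
    rw [h1, h2, ← pv_indicator_blocks width.toNat r hr]
    apply List.map_congr_left
    intro c _
    apply if_congr _ rfl rfl
    omega
  · rw [if_neg h]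
    rw [List.map_congr_left (g := fun _ => (0 : Int))
      (fun c _ => if_neg (by intro hc; exact h ⟨hc.1, hc.2.1, by omega⟩))]
    simp [List.map_const']

/-- B's result as a plain map over Nat ranges. -/
theorem pv_B_eq (width height : Int) :
    diagonalize_alt width height =
      (List.range height.toNat).map (fun (r : Nat) =>
        (List.range width.toNat).map (fun (c : Nat) =>
          if 0 < (r : Int) ∧ (r : Int) < height - 1 ∧ 0 < (c : Int) ∧ (c : Int) < width - 1
              ∧ (r : Int) = (c : Int) then (1 : Int) else 0)) := by
  rw [diagonalize_alt, PySem.List.pyRange_one 0 height, List.foldl_map, pv_foldl_snoc_map,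
      List.nil_append]
  simp only [zero_add, sub_zero]
  apply List.map_congr_left
  intro r _
  exact pv_row_eq width height r

-- ===== VERDICT (by name: the statement is the Claim_ definition above) =====
theorem diagonalize_spec : Claim_equal_diagonalize := by
  intro width height _
  unfold Spec_diagonalize
  apply List.ext_getElem?
  intro i
  rw [pv_A_getElem?, pv_B_eq, List.getElem?_replicate]
  by_cases hi : i < height.toNat
  · rw [if_pos hi, List.getElem?_map, List.getElem?_range hi]
    simp only [Option.map_some]
    congr 1
    apply List.ext_getElem?
    intro j
    rw [List.getElem?_map]
    by_cases hiR : i ∈ (List.range (height - 1 - 1).toNat).map (· + 1)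
    · rw [if_pos hiR, pvRow, pv_foldl_modify _ _ (pv_nodup_shift_range _),
          List.getElem?_replicate]
      rw [pv_mem_shift_range] at hiR
      by_cases hj : j < width.toNat
      · rw [if_pos hj, List.getElem?_range hj]
        simp only [Option.map_some]
        by_cases hjC : j ∈ (List.range (width - 1 - 1).toNat).map (· + 1)
        · rw [pv_mem_shift_range] at hjC
          rw [if_pos (by rw [pv_mem_shift_range]; omega)]
          congr 1
          split_ifs <;> omega
        · rw [pv_mem_shift_range] at hjC
          rw [if_neg (by rw [pv_mem_shift_range]; omega)]
          congr 1
          split_ifs <;> omega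
      · rw [if_neg hj]
        rw [show (List.range width.toNat)[j]? = none from by
          simp; omega]
        rfl
    · rw [if_neg hiR, List.getElem?_replicate]
      rw [pv_mem_shift_range] at hiR
      by_cases hj : j < width.toNat
      · rw [if_pos hj, List.getElem?_range hj]
        simp only [Option.map_some]
        congr 1
        split_ifs <;> omega
      · rw [if_neg hj]
        rw [show (List.range width.toNat)[j]? = none from by
          simp; omega]
        rfl
  · rw [if_neg hi]
    rw [show ((List.range height.toNat).map _)[i]? = none from by
      simp; omega]
    rfl
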